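-- pv_equiv track=rewrite | github.com/Kiefer-Networks/Licence-Manager | backend/src/licence_api/services/matching_service.py | _is_external_email
-- ===== SOURCE A (Python) =====
-- def _is_external_email(
--
--     email: str,
--     company_domains: list[str],
-- ) -> bool:
--     """Check if an email is external (not from company domains).
--
--     Args:
--         email: Email address to check
--         company_domains: List of company domain names
--
--     Returns:
--         True if email is external
--     """
--     if not email or "@" not in email:
--         return True  # Treat non-email identifiers as external
--
--     domain = email.split("@")[1].lower()
--
--     for company_domain in company_domains:
--         cd = company_domain.lower()
--         # Exact match or subdomain match
--         if domain == cd or domain.endswith("." + cd):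
--             return False
--
--     return True
-- ===== SOURCE B (Python) =====
-- def _is_external_email(email, company_domains):
--     if not email or "@" not in email:
--         return True
--     domain = email.split("@")[1].lower()
--     cds = {cd.lower() for cd in company_domains}
--     suffixes = [domain] + [domain[i + 1:] for i, ch in enumerate(domain) if ch == '.']
--     return all(s not in cds for s in suffixes)
-- ===== Notes on version B (the rewrite author's own statement) =====
-- stated objective: alternative
-- what changed: Instead of scanning the company-domain list and testing each with == / endswith, B builds a set of lowercased company domains once and checks membership of each dot-suffix of the email's domain (the domain itself plus the substring after every '.').
import Mathlib
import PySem

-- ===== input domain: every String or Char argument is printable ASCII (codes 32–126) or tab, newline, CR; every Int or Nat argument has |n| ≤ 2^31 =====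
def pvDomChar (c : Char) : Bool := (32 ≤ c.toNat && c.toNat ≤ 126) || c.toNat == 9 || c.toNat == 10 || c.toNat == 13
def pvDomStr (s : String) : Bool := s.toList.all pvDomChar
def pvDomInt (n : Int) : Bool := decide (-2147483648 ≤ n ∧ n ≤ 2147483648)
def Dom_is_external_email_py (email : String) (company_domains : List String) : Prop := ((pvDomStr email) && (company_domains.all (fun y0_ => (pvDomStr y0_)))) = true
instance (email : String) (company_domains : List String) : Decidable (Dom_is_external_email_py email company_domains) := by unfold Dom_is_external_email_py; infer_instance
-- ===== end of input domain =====

-- ===== PORT A =====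
-- B replaces A's per-company-domain ==/endswith scan by a membership check of the
-- email domain's dot-suffixes against a set of lowercased company domains (objective: alternative).

-- A's loop over company_domains: first matching company domain returns False, else True.
def pvLoopA (domain : List Char) : List String → Bool
  | [] => true
  | company_domain :: rest =>
    let cd := PySem.Chars.lower company_domain.toList
    if domain = cd ∨ PySem.Chars.endswith domain ('.' :: cd) = true then false
    else pvLoopA domain rest

def is_external_email_py (email : String) (company_domains : List String) : Bool :=
  if email = "" ∨ ¬ (PySem.Str.isIn "@" email = true) then true
  else
    let domain := PySem.Chars.lower
      (((PySem.Chars.split? email.toList "@".toList).getD []).getD 1 [])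
    pvLoopA domain company_domains

-- ===== PORT B =====
-- the suffixes of domain that follow a '.' (domain[i+1:] for each i with domain[i] = '.')
def pvDotTails : List Char → List (List Char)
  | [] => []
  | c :: rest => (if c = '.' then [rest] else []) ++ pvDotTails rest

def is_external_email_py_alt (email : String) (company_domains : List String) : Bool :=
  if email = "" ∨ ¬ (PySem.Str.isIn "@" email = true) then true
  else
    let domain := PySem.Chars.lower
      (((PySem.Chars.split? email.toList "@".toList).getD []).getD 1 [])
    let cds : PySem.Set (List Char) :=
      PySem.Set.ofList (company_domains.map (fun cd => PySem.Chars.lower cd.toList))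
    (domain :: pvDotTails domain).all (fun s => ¬ (PySem.Set.contains cds s = true))

-- ===== PRECONDITION & SPEC =====
def Spec_is_external_email_py (email : String) (company_domains : List String) (out : Bool) : Prop := out = is_external_email_py_alt email company_domains
instance (email : String) (company_domains : List String) (out : Bool) : Decidable (Spec_is_external_email_py email company_domains out) := by unfold Spec_is_external_email_py; infer_instance

-- ===== CLAIM (what is proved, stated in full; the proofs are below) =====
def Claim_equal_is_external_email_py : Prop := ∀ (email : String) (company_domains : List String), Dom_is_external_email_py email company_domains → Spec_is_external_email_py email company_domains (is_external_email_py email company_domains)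

-- ===== LEMMAS AND PROOFS =====

-- membership in pvDotTails is exactly being a suffix preceded by a '.'
theorem mem_pvDotTails_iff (d s : List Char) : s ∈ pvDotTails d ↔ ('.' :: s) <:+ d := by
  induction d with
  | nil => simp [pvDotTails]
  | cons c rest ih =>
    simp only [pvDotTails, List.mem_append, ih, List.suffix_cons_iff]
    constructor
    · rintro (h | h)
      · split_ifs at h with hc
        · simp at h; subst h; exact Or.inl (by rw [hc])
        · simp at h
      · exact Or.inr h
    · rintro (h | h)
      · obtain ⟨h1, h2⟩ := List.cons_eq_cons.mp h
        subst h2; simp [← h1]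
      · exact Or.inr h

-- A's loop returns true iff no company domain matches by == or endswith
theorem pvLoopA_eq_true_iff (d : List Char) (l : List String) :
    pvLoopA d l = true ↔
      ∀ cd ∈ l, ¬ (d = PySem.Chars.lower cd.toList ∨
        PySem.Chars.endswith d ('.' :: PySem.Chars.lower cd.toList) = true) := by
  induction l with
  | nil => simp [pvLoopA]
  | cons x rest ih =>
    simp only [pvLoopA, List.mem_cons]
    split_ifs with h
    · constructor
      · intro hf; exact absurd hf (by simp)
      · intro hall; exact absurd h (hall x (Or.inl rfl))
    · rw [ih]
      constructor
      · rintro hr cd (rfl | hm)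
        · exact h
        · exact hr cd hm
      · intro hall cd hm; exact hall cd (Or.inr hm)

-- the per-domain match condition is exactly membership in the suffix chain
theorem match_iff_mem_chain (d c : List Char) :
    (d = c ∨ PySem.Chars.endswith d ('.' :: c) = true) ↔ c ∈ d :: pvDotTails d := by
  rw [PySem.Chars.endswith_iff, List.mem_cons, mem_pvDotTails_iff]
  constructor
  · rintro (rfl | h); · exact Or.inl rfl
    · exact Or.inr h
  · rintro (rfl | h); · exact Or.inl rfl
    · exact Or.inr h

-- ===== VERDICT (by name: the statement is the Claim_ definition above) =====
theorem is_external_email_py_spec : Claim_equal_is_external_email_py := by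
  intro email company_domains _
  unfold Spec_is_external_email_py is_external_email_py is_external_email_py_alt
  split_ifs with h
  · rfl
  · set d := PySem.Chars.lower
      (((PySem.Chars.split? email.toList "@".toList).getD []).getD 1 []) with hd
    rw [Bool.eq_iff_iff, pvLoopA_eq_true_iff, List.all_eq_true]
    simp only [PySem.Set.contains_iff, PySem.Set.mem_ofList, List.mem_map,
      decide_eq_true_eq, match_iff_mem_chain]
    constructor
    · rintro hall s hs ⟨cd, hcd, rfl⟩
      exact hall cd hcd hs
    · intro hall cd hcd hs
      exact hall _ hs ⟨cd, hcd, rfl⟩
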